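-- pv_equiv track=rewrite | github.com/pypi-data/pypi-mirror-404 | packages/ryxpress/ryxpress-0.2.0.tar.gz/ryxpress-0.2.0/src/ryxpress/tracing.py | _marked_vec
-- ===== SOURCE A (Python) =====
-- from typing import Dict, List, Optional, Sequence, Tuple, Union
--
-- def _unique_preserve_order(seq: Sequence[str]) -> List[str]:
--     seen = set()
--     out: List[str] = []
--     for x in seq:
--         if x not in seen:
--             seen.add(x)
--             out.append(x)
--     return out
--
-- def _traverse(start: str, graph: Dict[str, List[str]]) -> List[str]:
--     """
--     Breadth-like traversal similar to the R implementation: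
--     - start with stack = graph[start]
--     - repeatedly pop the first element, append to visited, and enqueue neighbours
--       that are not already visited or in stack.
--     Returns visited in the order discovered.
--     """
--     visited: List[str] = []
--     stack: List[str] = list(graph.get(start, []) or [])
--     while stack:
--         node = stack[0]
--         stack = stack[1:]
--         if node in visited:
--             continue
--         visited.append(node)
--         nb = graph.get(node) or []
--         # append neighbours that are not already visited or queued
--         for n in nb:
--             if n not in visited and n not in stack:
--                 stack.append(n)
--     return visited
--
-- def _marked_vec(target: str, graph: Dict[str, List[str]], transitive: bool) -> List[str]:
--     imm = graph.get(target) or []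
--     imm_unique = _unique_preserve_order(imm)
--     if not transitive:
--         return imm_unique
--     full = _traverse(target, graph)
--     # transitive-only = elements in full that are not in imm (preserve order from 'full')
--     trans_only = [x for x in full if x not in imm_unique]
--     return imm_unique + [f"{t}*" for t in trans_only]
-- ===== SOURCE B (Python) =====
-- from typing import Dict, List
--
-- def _marked_vec(target: str, graph: Dict[str, List[str]], transitive: bool) -> List[str]:
--     imm = graph.get(target) or []
--     imm_unique = list(dict.fromkeys(imm))
--     if not transitive:
--         return imm_unique
--     # level-synchronous traversal: process whole frontiers per round (no queue,
--     # no per-node dequeue); visit order = concatenation of the layers.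
--     imm_set = set(imm)
--     seen = set(imm)
--     order: List[str] = []
--     frontier = imm_unique
--     while frontier:
--         order.extend(frontier)
--         nxt: List[str] = []
--         for node in frontier:
--             for n in graph.get(node) or []:
--                 if n not in seen:
--                     seen.add(n)
--                     nxt.append(n)
--         frontier = nxt
--     return imm_unique + [n + "*" for n in order if n not in imm_set]
-- ===== Notes on version B (the rewrite author's own statement) =====
-- stated objective: alternative
-- what changed: A pops single nodes off the head of a plain list and tests membership by linear scans of 'visited' and 'stack' on every step; B abandons the queue entirely and runs a level-synchronous traversal: it expands a whole frontier per round into the next layer (set-based seen check), the visit order being the concatenation of the layers, then appends the starred non-immediate nodes.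
import Mathlib
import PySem

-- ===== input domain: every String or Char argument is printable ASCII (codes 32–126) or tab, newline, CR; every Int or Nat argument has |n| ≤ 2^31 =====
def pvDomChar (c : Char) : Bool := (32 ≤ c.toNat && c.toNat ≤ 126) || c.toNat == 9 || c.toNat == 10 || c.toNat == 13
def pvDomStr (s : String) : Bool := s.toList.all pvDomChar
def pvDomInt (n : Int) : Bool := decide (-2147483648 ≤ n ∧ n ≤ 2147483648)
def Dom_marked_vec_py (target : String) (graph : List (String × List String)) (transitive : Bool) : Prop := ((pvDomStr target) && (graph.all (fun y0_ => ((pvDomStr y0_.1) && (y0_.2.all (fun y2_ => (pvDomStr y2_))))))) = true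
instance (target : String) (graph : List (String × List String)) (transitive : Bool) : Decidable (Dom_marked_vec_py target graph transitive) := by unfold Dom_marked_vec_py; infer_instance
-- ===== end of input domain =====

-- B replaces A's pop-one-node list traversal (linear visited/stack scans per step) by a
-- level-synchronous traversal: whole frontiers are expanded per round; visit order is the
-- concatenation of the layers.

-- ===== PORT A =====

-- `graph.get(k) or []` (the only falsy list value is [], so `get(k) or []` = getD k [])
def pvAdj (graph : List (String × List String)) (k : String) : List String :=
  (PySem.Dict.mk graph).getD k []

-- _unique_preserve_order: seen-set + out-list loop
def pvUniquePO (seq : List String) : List String :=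
  (seq.foldl
    (fun (st : PySem.Set String × List String) x =>
      if st.1.contains x then st else (st.1.add x, st.2 ++ [x]))
    (PySem.Set.empty, [])).2

-- termination potential: total adjacency mass of entries whose key is not yet in v
def pvPot (graph : List (String × List String)) (v : List String) : Nat :=
  ((graph.filter (fun p => !(v.contains p.1))).map (fun p => p.2.length)).sum

lemma pvPot_cons (p : String × List String) (g : List (String × List String)) (v : List String) :
    pvPot (p :: g) v = (if p.1 ∈ v then 0 else p.2.length) + pvPot g v := by
  simp only [pvPot, List.filter_cons, List.contains_eq_mem]
  by_cases h : p.1 ∈ v <;> simp [h]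

lemma pvPot_mono (graph : List (String × List String)) (v : List String) (node : String) :
    pvPot graph (v ++ [node]) ≤ pvPot graph v := by
  induction graph with
  | nil => simp [pvPot]
  | cons p g ih =>
    rw [pvPot_cons, pvPot_cons]
    have hmem : p.1 ∈ v ++ [node] ↔ p.1 ∈ v ∨ p.1 = node := by simp
    by_cases h1 : p.1 ∈ v
    · simp [hmem, h1]; omega
    · by_cases h2 : p.1 = node
      · simp [hmem, h1, h2]; omega
      · simp [hmem, h1, h2]; omega

lemma pvPot_visit (graph : List (String × List String)) (v : List String) (node : String)
    (h : v.contains node = false) :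
    pvPot graph (v ++ [node]) + (pvAdj graph node).length ≤ pvPot graph v := by
  have hnv : node ∉ v := by simpa [List.contains_eq_mem] using h
  induction graph with
  | nil => simp [pvPot, pvAdj, PySem.Dict.getD_eq_get?_getD, PySem.Dict.get?]
  | cons p g ih =>
    obtain ⟨k, ns⟩ := p
    have hadj : pvAdj ((k, ns) :: g) node = if (k == node) = true then ns else pvAdj g node := by
      simp only [pvAdj, PySem.Dict.getD_eq_get?_getD, PySem.Dict.get?_mk_cons]
      by_cases h : (k == node) = true <;> simp [h]
    rw [pvPot_cons, pvPot_cons, hadj]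
    by_cases hk : k = node
    · subst hk
      have h2 : ((k, ns) : String × List String).1 ∉ v := hnv
      have hmono := pvPot_mono g v k
      rw [if_pos (show ((k, ns) : String × List String).1 ∈ v ++ [k] by simp),
          if_neg h2, if_pos (by simp)]
      have hns : ((k, ns) : String × List String).2 = ns := rfl
      rw [hns]
      omega
    · have h1 : (((k, ns) : String × List String).1 ∈ v ++ [node]) ↔ k ∈ v := by simp [hk]
      rw [if_neg (show ¬(k == node) = true by simp [hk])]
      by_cases h2 : k ∈ v
      · rw [if_pos (h1.mpr h2), if_pos h2]
        omega
      · rw [if_neg (fun hh => h2 (h1.mp hh)), if_neg h2]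
        omega

lemma pvFoldA_len (v2 : List String) :
    ∀ (nb s : List String),
      (nb.foldl (fun s n => if !(v2.contains n) && !(s.contains n) then s ++ [n] else s) s).length
        ≤ s.length + nb.length := by
  intro nb
  induction nb with
  | nil => intro s; simp
  | cons n nb ih =>
    intro s
    simp only [List.foldl_cons, List.length_cons]
    by_cases h : (!(v2.contains n) && !(s.contains n)) = true
    · rw [if_pos h]
      have := ih (s ++ [n])
      simp only [List.length_append, List.length_cons, List.length_nil] at this
      omega
    · rw [if_neg h]
      have := ih s
      omega

-- _traverse's while loop (stack = stack[1:]; skip if visited; else visit and enqueue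
-- neighbours not already visited or queued)
def pvTraverse (graph : List (String × List String)) (visited stack : List String) : List String :=
  match stack with
  | [] => visited
  | node :: rest =>
    if visited.contains node then pvTraverse graph visited rest
    else
      pvTraverse graph (visited ++ [node])
        ((pvAdj graph node).foldl
          (fun s n => if !((visited ++ [node]).contains n) && !(s.contains n) then s ++ [n] else s)
          rest)
termination_by pvPot graph visited + stack.length
decreasing_by
  · simp only [List.length_cons]
    omega
  · have h1 := pvPot_visit graph visited node (by simpa using ‹¬ visited.contains node = true›)
    have h2 := pvFoldA_len (visited ++ [node]) (pvAdj graph node) rest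
    simp only [dite_eq_ite, List.length_cons]
    omega

-- _marked_vec (A)
def marked_vec_py (target : String) (graph : List (String × List String)) (transitive : Bool) : List String :=
  let imm := pvAdj graph target
  let imm_unique := pvUniquePO imm
  if !transitive then imm_unique
  else
    let full := pvTraverse graph [] (pvAdj graph target)
    let trans_only := full.filter (fun x => !(imm_unique.contains x))
    imm_unique ++ trans_only.map (fun t => t ++ "*")

-- ===== PORT B =====

-- weight of a frontier: one visit plus one adjacency scan per node
def pvWeight (graph : List (String × List String)) (q : List String) : Nat :=
  (q.map (fun n => 1 + (pvAdj graph n).length)).sum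

-- B's inner double loop: expand every node of the frontier, collecting unseen neighbours
-- into the next layer and into 'seen'
def pvExpand (graph : List (String × List String)) (frontier : List String)
    (st : List String × PySem.Set String) : List String × PySem.Set String :=
  frontier.foldl
    (fun st node =>
      (pvAdj graph node).foldl
        (fun (st : List String × PySem.Set String) n =>
          if st.2.contains n then st else (st.1 ++ [n], st.2.add n)) st)
    st

lemma pvFoldB_le (graph : List (String × List String)) :
    ∀ (nb q : List String) (qd : PySem.Set String),
      pvWeight graph
          (nb.foldl (fun (st : List String × PySem.Set String) n =>
            if st.2.contains n then st else (st.1 ++ [n], st.2.add n)) (q, qd)).1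
        + pvPot graph
          (nb.foldl (fun (st : List String × PySem.Set String) n =>
            if st.2.contains n then st else (st.1 ++ [n], st.2.add n)) (q, qd)).2
        ≤ pvWeight graph q + pvPot graph qd + nb.length := by
  intro nb
  induction nb with
  | nil => intro q qd; simp
  | cons n nb ih =>
    intro q qd
    simp only [List.foldl_cons, List.length_cons]
    by_cases h : qd.contains n = true
    · rw [if_pos h]
      have := ih q qd
      omega
    · have h' : qd.contains n = false := by simpa using h
      rw [if_neg h]
      have hadd : PySem.Set.add qd n = qd ++ [n] := by
        simp only [PySem.Set.add]
        rw [if_neg h]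
      have hv := pvPot_visit graph qd n h'
      have hw : pvWeight graph (q ++ [n]) = pvWeight graph q + (1 + (pvAdj graph n).length) := by
        simp [pvWeight]
      have := ih (q ++ [n]) (PySem.Set.add qd n)
      rw [hadd] at this ⊢
      omega

lemma pvExpand_le (graph : List (String × List String)) :
    ∀ (frontier q : List String) (qd : PySem.Set String),
      pvWeight graph (pvExpand graph frontier (q, qd)).1
          + pvPot graph (pvExpand graph frontier (q, qd)).2
        ≤ pvWeight graph q + pvPot graph qd
          + ((frontier.map (fun n => (pvAdj graph n).length)).sum) := by
  intro frontier
  induction frontier with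
  | nil => intro q qd; simp [pvExpand]
  | cons node rest ih =>
    intro q qd
    simp only [pvExpand, List.foldl_cons, List.map_cons, List.sum_cons]
    have h1 := pvFoldB_le graph (pvAdj graph node) q qd
    have h2 := ih ((pvAdj graph node).foldl
        (fun (st : List String × PySem.Set String) n =>
          if st.2.contains n then st else (st.1 ++ [n], st.2.add n)) (q, qd)).1
      ((pvAdj graph node).foldl
        (fun (st : List String × PySem.Set String) n =>
          if st.2.contains n then st else (st.1 ++ [n], st.2.add n)) (q, qd)).2
    simp only [pvExpand, Prod.mk.eta] at h2
    omega

lemma pvWeight_eq (graph : List (String × List String)) (q : List String) :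
    pvWeight graph q = q.length + (q.map (fun n => (pvAdj graph n).length)).sum := by
  induction q with
  | nil => simp [pvWeight]
  | cons n q ih =>
    simp only [pvWeight, List.map_cons, List.sum_cons, List.length_cons] at *
    omega

-- B's while loop: emit the whole frontier, then recurse on the next layer
def pvLayers (graph : List (String × List String)) (frontier : List String)
    (seen : PySem.Set String) : List String :=
  match frontier with
  | [] => []
  | node :: rest =>
    (node :: rest) ++
      pvLayers graph (pvExpand graph (node :: rest) ([], seen)).1
        (pvExpand graph (node :: rest) ([], seen)).2
termination_by pvWeight graph frontier + pvPot graph seen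
decreasing_by
  have h1 := pvExpand_le graph (node :: rest) [] seen
  have h2 := pvWeight_eq graph (node :: rest)
  have h0 : pvWeight graph ([] : List String) = 0 := by simp [pvWeight]
  simp only [List.length_cons] at h2
  omega

-- _marked_vec (B)
def marked_vec_py_alt (target : String) (graph : List (String × List String)) (transitive : Bool) : List String :=
  let imm := pvAdj graph target
  let imm_unique := PySem.List.dedup imm          -- list(dict.fromkeys(imm))
  if !transitive then imm_unique
  else
    let immSet := PySem.Set.ofList imm
    let order := pvLayers graph imm_unique (PySem.Set.ofList imm)
    imm_unique ++ (order.filter (fun n => !(immSet.contains n))).map (fun n => n ++ "*")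

-- ===== PRECONDITION & SPEC =====
def Spec_marked_vec_py (target : String) (graph : List (String × List String)) (transitive : Bool) (out : List String) : Prop := out = marked_vec_py_alt target graph transitive
instance (target : String) (graph : List (String × List String)) (transitive : Bool) (out : List String) : Decidable (Spec_marked_vec_py target graph transitive out) := by unfold Spec_marked_vec_py; infer_instance

-- ===== CLAIM (what is proved, stated in full; the proofs are below) =====
def Claim_equal_marked_vec_py : Prop := ∀ (target : String) (graph : List (String × List String)) (transitive : Bool), Dom_marked_vec_py target graph transitive → Spec_marked_vec_py target graph transitive (marked_vec_py target graph transitive)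

-- ===== LEMMAS AND PROOFS =====

-- A's seen-set/out-list dedup loop equals list(dict.fromkeys(·))
lemma pvUniquePO_eq_dedup (seq : List String) : pvUniquePO seq = PySem.List.dedup seq := by
  have key : ∀ (l : List String) (s : PySem.Set String),
      l.foldl (fun (st : PySem.Set String × List String) x =>
          if st.1.contains x then st else (st.1.add x, st.2 ++ [x])) (s, s)
        = (l.foldl PySem.Set.add s, l.foldl PySem.Set.add s) := by
    intro l
    induction l with
    | nil => intro s; rfl
    | cons x l ih =>
      intro s
      simp only [List.foldl_cons]
      by_cases h : s.contains x = true
      · have ha : PySem.Set.add s x = s := by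
          simp only [PySem.Set.add]; rw [if_pos h]
        rw [if_pos h, ha]
        exact ih s
      · have ha : PySem.Set.add s x = s ++ [x] := by
          simp only [PySem.Set.add]; rw [if_neg h]
        rw [if_neg h, ha]
        exact ih (s ++ [x])
  exact (congrArg Prod.snd (key seq PySem.Set.empty)).trans rfl

lemma discard_ofList (l : List String) (x : String) :
    (PySem.Set.ofList l).discard x = PySem.Set.ofList (l.filter (fun y => !(y == x))) := by
  induction l using List.reverseRecOn with
  | nil => rfl
  | append_singleton l a ih =>
    rw [PySem.Set.ofList_append_singleton, List.filter_append]
    by_cases ha : a = x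
    · subst ha
      have hfa : List.filter (fun y => !(y == a)) [a] = [] := by simp
      rw [hfa, List.append_nil, ← ih]
      by_cases hc : (PySem.Set.ofList l).contains a = true
      · have h1 : (PySem.Set.ofList l).add a = PySem.Set.ofList l := by
          simp only [PySem.Set.add]; rw [if_pos hc]
        rw [h1]
      · have h1 : (PySem.Set.ofList l).add a = PySem.Set.ofList l ++ [a] := by
          simp only [PySem.Set.add]; rw [if_neg hc]
        rw [h1]
        simp [PySem.Set.discard, List.filter_append]
    · have hne : (a == x) = false := by simp [ha]
      have hfa : List.filter (fun y => !(y == x)) [a] = [a] := by simp [hne]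
      rw [hfa, PySem.Set.ofList_append_singleton, ← ih]
      by_cases hc : (PySem.Set.ofList l).contains a = true
      · have h1 : (PySem.Set.ofList l).add a = PySem.Set.ofList l := by
          simp only [PySem.Set.add]; rw [if_pos hc]
        have hmem : a ∈ (PySem.Set.ofList l : List String) := by
          simpa [List.contains_eq_mem] using hc
        have hc2 : ((PySem.Set.ofList l).discard x).contains a = true := by
          simp only [PySem.Set.discard, List.contains_eq_mem, List.mem_filter]
          simp [hmem, hne]
        have h2 : ((PySem.Set.ofList l).discard x).add a = (PySem.Set.ofList l).discard x := by
          simp only [PySem.Set.add]; rw [if_pos hc2]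
        rw [h1, h2]
      · have h1 : (PySem.Set.ofList l).add a = PySem.Set.ofList l ++ [a] := by
          simp only [PySem.Set.add]; rw [if_neg hc]
        have hmem : a ∉ (PySem.Set.ofList l : List String) := by
          simpa [List.contains_eq_mem] using hc
        have hc2 : ¬ ((PySem.Set.ofList l).discard x).contains a = true := by
          simp only [PySem.Set.discard, List.contains_eq_mem, List.mem_filter]
          simp [hmem]
        have h2 : ((PySem.Set.ofList l).discard x).add a = (PySem.Set.ofList l).discard x ++ [a] := by
          simp only [PySem.Set.add]; rw [if_neg hc2]
        rw [h1, h2]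
        simp [PySem.Set.discard, List.filter_append, hne]

lemma dedup_cons (x : String) (l : List String) :
    PySem.List.dedup (x :: l) = x :: PySem.List.dedup (l.filter (fun y => !(y == x))) := by
  simp only [PySem.List.dedup_eq_ofList, PySem.Set.ofList_cons, discard_ofList]

-- the reference queue BFS (proof device bridging A's traversal and B's layered loop)
def pvBfs (graph : List (String × List String)) (order q : List String) (qd : PySem.Set String) : List String :=
  match q with
  | [] => order
  | node :: rest =>
    pvBfs graph (order ++ [node])
      ((pvAdj graph node).foldl (fun (st : List String × PySem.Set String) n =>
          if st.2.contains n then st else (st.1 ++ [n], st.2.add n)) (rest, qd)).1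
      ((pvAdj graph node).foldl (fun (st : List String × PySem.Set String) n =>
          if st.2.contains n then st else (st.1 ++ [n], st.2.add n)) (rest, qd)).2
termination_by pvWeight graph q + pvPot graph qd
decreasing_by
  have := pvFoldB_le graph (pvAdj graph node) rest qd
  simp only [dite_eq_ite, pvWeight, List.map_cons, List.sum_cons] at *
  omega

-- the paired inner loops: A appends neighbours not in visited/stack, the queue BFS appends
-- neighbours not in queued; the invariant is preserved
lemma fold_sync (graph : List (String × List String)) (v2 : List String) :
    ∀ (nb s q : List String) (qd : PySem.Set String),
      (∀ x, x ∈ qd ↔ x ∈ v2 ∨ x ∈ s) →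
      q = PySem.List.dedup (s.filter (fun x => !(v2.contains x))) →
      (∀ x, x ∈ (nb.foldl (fun (st : List String × PySem.Set String) n =>
            if st.2.contains n then st else (st.1 ++ [n], st.2.add n)) (q, qd)).2
          ↔ x ∈ v2 ∨ x ∈ nb.foldl (fun s n =>
              if !(v2.contains n) && !(s.contains n) then s ++ [n] else s) s) ∧
      (nb.foldl (fun (st : List String × PySem.Set String) n =>
            if st.2.contains n then st else (st.1 ++ [n], st.2.add n)) (q, qd)).1
        = PySem.List.dedup ((nb.foldl (fun s n =>
              if !(v2.contains n) && !(s.contains n) then s ++ [n] else s) s).filter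
            (fun x => !(v2.contains x))) := by
  intro nb
  induction nb with
  | nil => intro s q qd h1 h2; exact ⟨h1, h2⟩
  | cons n nb ih =>
    intro s q qd h1 h2
    simp only [List.foldl_cons]
    by_cases hq : qd.contains n = true
    · have hmem : n ∈ v2 ∨ n ∈ s := (h1 n).1 (by simpa [List.contains_eq_mem] using hq)
      have hA : (!(v2.contains n) && !(s.contains n)) = false := by
        rcases hmem with h | h <;> simp [List.contains_eq_mem, h]
      rw [if_pos hq, if_neg (by rw [hA]; exact Bool.false_ne_true)]
      exact ih s q qd h1 h2
    · have hq' : qd.contains n = false := by simpa using hq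
      have hnqd : n ∉ qd := by simpa [List.contains_eq_mem] using hq'
      have hnv : n ∉ v2 := fun h => hnqd ((h1 n).2 (Or.inl h))
      have hns : n ∉ s := fun h => hnqd ((h1 n).2 (Or.inr h))
      have hcv : v2.contains n = false := by simpa [List.contains_eq_mem] using hnv
      have hcs : s.contains n = false := by simpa [List.contains_eq_mem] using hns
      have hA : (!(v2.contains n) && !(s.contains n)) = true := by rw [hcv, hcs]; rfl
      rw [if_neg hq, if_pos hA]
      have hadd : PySem.Set.add qd n = qd ++ [n] := by
        simp only [PySem.Set.add]; rw [if_neg hq]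
      rw [hadd]
      have hfilter : (s ++ [n]).filter (fun x => !(v2.contains x))
          = s.filter (fun x => !(v2.contains x)) ++ [n] := by
        rw [List.filter_append, List.filter_cons, hcv]
        simp
      have hnq : n ∉ q := by
        intro hmem
        rw [h2, PySem.List.dedup_eq_ofList] at hmem
        exact hns (List.mem_of_mem_filter ((PySem.Set.mem_ofList _ n).1 hmem))
      have hq2 : q ++ [n] = PySem.List.dedup ((s ++ [n]).filter (fun x => !(v2.contains x))) := by
        rw [hfilter, PySem.List.dedup_eq_ofList, PySem.Set.ofList_append_singleton]
        have hcq : (PySem.Set.ofList (s.filter (fun x => !(v2.contains x)))).contains n = false := by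
          rw [← PySem.List.dedup_eq_ofList, ← h2]
          simpa [List.contains_eq_mem] using hnq
        have hadd2 : (PySem.Set.ofList (s.filter (fun x => !(v2.contains x)))).add n
            = PySem.Set.ofList (s.filter (fun x => !(v2.contains x))) ++ [n] := by
          simp only [PySem.Set.add]; rw [if_neg (by rw [hcq]; exact Bool.false_ne_true)]
        rw [hadd2, ← PySem.List.dedup_eq_ofList, ← h2]
      refine ih (s ++ [n]) (q ++ [n]) (qd ++ [n]) ?_ hq2
      intro x
      constructor
      · intro hx
        rcases List.mem_append.1 hx with hx | hx
        · rcases (h1 x).1 hx with h | h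
          · exact Or.inl h
          · exact Or.inr (List.mem_append.2 (Or.inl h))
        · exact Or.inr (List.mem_append.2 (Or.inr hx))
      · intro hx
        rcases hx with h | h
        · exact List.mem_append.2 (Or.inl ((h1 x).2 (Or.inl h)))
        · rcases List.mem_append.1 h with h | h
          · exact List.mem_append.2 (Or.inl ((h1 x).2 (Or.inr h)))
          · exact List.mem_append.2 (Or.inr h)

-- the bisimulation: A's traversal loop and the queue BFS return the same visit order
lemma bisim : ∀ (N : Nat) (graph : List (String × List String)) (v s q : List String) (qd : PySem.Set String),
    pvPot graph v + s.length ≤ N →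
    (∀ x, x ∈ qd ↔ x ∈ v ∨ x ∈ s) →
    q = PySem.List.dedup (s.filter (fun x => !(v.contains x))) →
    pvTraverse graph v s = pvBfs graph v q qd := by
  intro N
  induction N with
  | zero =>
    intro graph v s q qd hN h1 h2
    have hs : s = [] := by
      cases s with
      | nil => rfl
      | cons a l => simp at hN
    subst hs
    simp only [List.filter_nil] at h2
    rw [h2, show PySem.List.dedup ([] : List String) = ([] : List String) from rfl]
    simp only [pvTraverse, pvBfs]
  | succ N ih =>
    intro graph v s q qd hN h1 h2
    cases s with
    | nil =>
      simp only [List.filter_nil] at h2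
      rw [h2, show PySem.List.dedup ([] : List String) = ([] : List String) from rfl]
      simp only [pvTraverse, pvBfs]
    | cons node rest =>
      by_cases hv : v.contains node = true
      · rw [pvTraverse]
        simp only [hv, if_pos rfl]
        refine ih graph v rest q qd ?_ ?_ ?_
        · simp only [List.length_cons] at hN; omega
        · intro x
          rw [h1 x]
          have hnodev : node ∈ v := by simpa [List.contains_eq_mem] using hv
          constructor
          · rintro (h | h)
            · exact Or.inl h
            · rcases List.mem_cons.1 h with h | h
              · exact Or.inl (h ▸ hnodev)
              · exact Or.inr h
          · rintro (h | h)
            · exact Or.inl h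
            · exact Or.inr (List.mem_cons_of_mem _ h)
        · rw [h2, List.filter_cons, hv]
          simp
      · have hv' : v.contains node = false := by simpa using hv
        have hfcons : (node :: rest).filter (fun x => !(v.contains x))
            = node :: rest.filter (fun x => !(v.contains x)) := by
          rw [List.filter_cons, hv']
          simp
        have hPP : ∀ x : String, ((!(v.contains x)) && !(x == node))
            = !((v ++ [node]).contains x) := by
          intro x
          by_cases hx : x = node
          · subst hx
            have h4 : (v ++ [x]).contains x = true := by simp [List.contains_eq_mem]
            rw [h4]
            simp
          · have h4 : (v ++ [node]).contains x = v.contains x := by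
              simp [List.contains_eq_mem, hx]
            have h5 : (x == node) = false := by simpa using hx
            rw [h4, h5]
            simp
        have hfe : List.filter (fun a => (!(a == node) && !(v.contains a))) rest
            = List.filter (fun x => !((v ++ [node]).contains x)) rest :=
          List.filter_congr (fun x _ => by rw [← hPP x, Bool.and_comm])
        have hq : q = node :: PySem.List.dedup (rest.filter (fun x => !((v ++ [node]).contains x))) := by
          rw [h2, hfcons, dedup_cons, List.filter_filter, hfe]
        rw [pvTraverse, if_neg hv, hq, pvBfs]
        have hsync := fold_sync graph (v ++ [node]) (pvAdj graph node) rest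
          (PySem.List.dedup (rest.filter (fun x => !((v ++ [node]).contains x)))) qd
          (by
            intro x
            rw [h1 x]
            constructor
            · rintro (h | h)
              · exact Or.inl (List.mem_append.2 (Or.inl h))
              · rcases List.mem_cons.1 h with h | h
                · exact Or.inl (List.mem_append.2 (Or.inr (by simp [h])))
                · exact Or.inr h
            · rintro (h | h)
              · rcases List.mem_append.1 h with h | h
                · exact Or.inl h
                · exact Or.inr (List.mem_cons.2 (Or.inl (by simpa using h)))
              · exact Or.inr (List.mem_cons_of_mem _ h))
          rfl
        refine ih graph (v ++ [node]) _ _ _ ?_ hsync.1 hsync.2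
        have hlen := pvFoldA_len (v ++ [node]) (pvAdj graph node) rest
        have hpot := pvPot_visit graph v node hv'
        simp only [List.length_cons] at hN
        omega

-- prepending to the pending list commutes with the inner fold (it only appends)
lemma fold_prepend (graph : List (String × List String)) :
    ∀ (nb pre q : List String) (qd : PySem.Set String),
      nb.foldl (fun (st : List String × PySem.Set String) n =>
          if st.2.contains n then st else (st.1 ++ [n], st.2.add n)) (pre ++ q, qd)
        = (pre ++ (nb.foldl (fun (st : List String × PySem.Set String) n =>
            if st.2.contains n then st else (st.1 ++ [n], st.2.add n)) (q, qd)).1,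
           (nb.foldl (fun (st : List String × PySem.Set String) n =>
            if st.2.contains n then st else (st.1 ++ [n], st.2.add n)) (q, qd)).2) := by
  intro nb
  induction nb with
  | nil => intro pre q qd; simp
  | cons n nb ih =>
    intro pre q qd
    simp only [List.foldl_cons]
    by_cases h : qd.contains n = true
    · rw [if_pos h, if_pos h]
      exact ih pre q qd
    · rw [if_neg h, if_neg h]
      simpa [List.append_assoc] using ih pre (q ++ [n]) (PySem.Set.add qd n)

-- the queue BFS processes a whole frontier exactly like one round of pvExpand
lemma bfs_round (graph : List (String × List String)) :
    ∀ (frontier order acc : List String) (qd : PySem.Set String),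
      pvBfs graph order (frontier ++ acc) qd
        = pvBfs graph (order ++ frontier) (pvExpand graph frontier (acc, qd)).1
            (pvExpand graph frontier (acc, qd)).2 := by
  intro frontier
  induction frontier with
  | nil => intro order acc qd; simp [pvExpand]
  | cons node rest ih =>
    intro order acc qd
    rw [List.cons_append, pvBfs, fold_prepend graph (pvAdj graph node) rest acc qd]
    have := ih (order ++ [node])
      ((pvAdj graph node).foldl (fun (st : List String × PySem.Set String) n =>
          if st.2.contains n then st else (st.1 ++ [n], st.2.add n)) (acc, qd)).1
      ((pvAdj graph node).foldl (fun (st : List String × PySem.Set String) n =>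
          if st.2.contains n then st else (st.1 ++ [n], st.2.add n)) (acc, qd)).2
    rw [this]
    simp [pvExpand, List.foldl_cons, List.append_assoc]

-- queue BFS order = concatenation of B's layers
lemma bfs_eq_layers : ∀ (N : Nat) (graph : List (String × List String)) (order frontier : List String) (seen : PySem.Set String),
    pvWeight graph frontier + pvPot graph seen ≤ N →
    pvBfs graph order frontier seen = order ++ pvLayers graph frontier seen := by
  intro N
  induction N with
  | zero =>
    intro graph order frontier seen hN
    cases frontier with
    | nil => simp [pvBfs, pvLayers]
    | cons node rest =>
      exfalso
      have := pvWeight_eq graph (node :: rest)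
      simp only [List.length_cons] at this
      omega
  | succ N ih =>
    intro graph order frontier seen hN
    cases frontier with
    | nil => simp [pvBfs, pvLayers]
    | cons node rest =>
      have hround := bfs_round graph (node :: rest) order [] seen
      rw [List.append_nil] at hround
      rw [hround, pvLayers]
      have hdec : pvWeight graph (pvExpand graph (node :: rest) ([], seen)).1
          + pvPot graph (pvExpand graph (node :: rest) ([], seen)).2 ≤ N := by
        have h1 := pvExpand_le graph (node :: rest) [] seen
        have h2 := pvWeight_eq graph (node :: rest)
        have h0 : pvWeight graph ([] : List String) = 0 := by simp [pvWeight]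
        simp only [List.length_cons] at h2
        omega
      rw [ih graph (order ++ (node :: rest)) _ _ hdec, List.append_assoc]

-- ===== VERDICT (by name: the statement is the Claim_ definition above) =====
theorem marked_vec_py_spec : Claim_equal_marked_vec_py := by
  intro target graph transitive _
  unfold Spec_marked_vec_py
  cases transitive with
  | false =>
    have hA : marked_vec_py target graph false = pvUniquePO (pvAdj graph target) := rfl
    have hB : marked_vec_py_alt target graph false = PySem.List.dedup (pvAdj graph target) := rfl
    rw [hA, hB, pvUniquePO_eq_dedup]
  | true =>
    have hA : marked_vec_py target graph true
        = pvUniquePO (pvAdj graph target)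
          ++ ((pvTraverse graph [] (pvAdj graph target)).filter
                (fun x => !((pvUniquePO (pvAdj graph target)).contains x))).map
              (fun t => t ++ "*") := rfl
    have hB : marked_vec_py_alt target graph true
        = PySem.List.dedup (pvAdj graph target)
          ++ ((pvLayers graph (PySem.List.dedup (pvAdj graph target))
                  (PySem.Set.ofList (pvAdj graph target))).filter
                (fun n => !((PySem.Set.ofList (pvAdj graph target)).contains n))).map
              (fun n => n ++ "*") := rfl
    have hfull : pvTraverse graph [] (pvAdj graph target)
        = pvLayers graph (PySem.List.dedup (pvAdj graph target)) (PySem.Set.ofList (pvAdj graph target)) := by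
      have h1 : pvTraverse graph [] (pvAdj graph target)
          = pvBfs graph [] (PySem.List.dedup (pvAdj graph target)) (PySem.Set.ofList (pvAdj graph target)) := by
        refine bisim (pvPot graph [] + (pvAdj graph target).length) graph [] (pvAdj graph target) _ _ le_rfl ?_ ?_
        · intro x
          simp [PySem.Set.mem_ofList]
        · simp
      rw [h1, bfs_eq_layers (pvWeight graph (PySem.List.dedup (pvAdj graph target))
            + pvPot graph (PySem.Set.ofList (pvAdj graph target))) graph [] _ _ le_rfl]
      simp
    rw [hA, hB, hfull, pvUniquePO_eq_dedup, PySem.List.dedup_eq_ofList]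
    rfl
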